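-- pv_equiv track=rewrite | github.com/MrBrantCode/unitest_baseline | mut_generate/mist_train_cf/cf_36424/solution.py | count_letter_occurrences
-- ===== SOURCE A (Python) =====
-- def count_letter_occurrences(s):
--     two_count = 0
--     three_count = 0
--     letter_count = {}
--
--     for line in s.split('\n'):
--         line_count = {}
--         for letter in line:
--             if letter in line_count:
--                 line_count[letter] += 1
--             else:
--                 line_count[letter] = 1
--         if 2 in line_count.values():
--             two_count += 1
--         if 3 in line_count.values():
--             three_count += 1
--
--     return two_count, three_count
-- ===== SOURCE B (Python) =====
-- def count_letter_occurrences(s):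
--     two_count = 0
--     three_count = 0
--     for line in s.split('\n'):
--         t = sorted(line)
--         has2 = False
--         has3 = False
--         while t:
--             run = 1
--             while run < len(t) and t[run] == t[0]:
--                 run += 1
--             if run == 2:
--                 has2 = True
--             if run == 3:
--                 has3 = True
--             t = t[run:]
--         two_count += has2
--         three_count += has3
--     return two_count, three_count
-- ===== Notes on version B (the rewrite author's own statement) =====
-- stated objective: alternative
-- what changed: Replaces the per-line hash-map character counter and a values() membership test by sorting each line and scanning the runs of equal adjacent characters, flagging a run of length exactly 2 or 3.
import Mathlib
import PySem

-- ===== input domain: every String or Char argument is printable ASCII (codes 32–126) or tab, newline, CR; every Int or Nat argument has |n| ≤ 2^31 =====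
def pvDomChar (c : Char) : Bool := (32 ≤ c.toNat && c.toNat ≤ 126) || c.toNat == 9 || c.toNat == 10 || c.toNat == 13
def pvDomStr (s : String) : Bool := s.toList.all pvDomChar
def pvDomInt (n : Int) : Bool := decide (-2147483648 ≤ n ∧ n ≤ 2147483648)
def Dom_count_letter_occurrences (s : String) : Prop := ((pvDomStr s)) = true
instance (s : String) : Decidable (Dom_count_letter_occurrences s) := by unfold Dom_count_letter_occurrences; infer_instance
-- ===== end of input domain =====

-- B replaces A's per-line hash-map counter by sort-then-run-length scanning; no speed claim (alternative algorithm of similar cost).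


-- ===== PORT A =====
def count_letter_occurrences (s : String) : Int × Int :=
  (PySem.Chars.splitOn s.toList ['\n']).foldl
    (fun (acc : Int × Int) line =>
      -- inner loop: build the per-line character-count dict
      let lc : PySem.Dict Char Int :=
        line.foldl
          (fun d letter =>
            if d.contains letter then d.insert letter (d.getD letter 0 + 1)
            else d.insert letter 1)
          PySem.Dict.empty
      let two := if (2 : Int) ∈ lc.values then acc.1 + 1 else acc.1
      let three := if (3 : Int) ∈ lc.values then acc.2 + 1 else acc.2
      (two, three))
    (0, 0)

-- ===== PORT B =====
-- the inner `while t:` loop of Source B: the inner counting while-loop is ported as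
-- takeWhile-length (exact: it counts the leading elements equal to t[0]), and
-- `t = t[run:]` is the corresponding drop.
def pvRunScan : List Char → Bool × Bool
  | [] => (false, false)
  | c :: rest =>
    let k := (rest.takeWhile (fun x => x == c)).length
    let run := 1 + k
    let p := pvRunScan (rest.drop k)
    (p.1 || run == 2, p.2 || run == 3)
termination_by l => l.length
decreasing_by
  simp only [List.length_cons]
  exact Nat.lt_succ_of_le (List.length_drop .. ▸ Nat.sub_le _ _)

def count_letter_occurrences_alt (s : String) : Int × Int :=
  (PySem.Chars.splitOn s.toList ['\n']).foldl
    (fun (acc : Int × Int) line =>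
      let t := PySem.List.sorted line (fun x => x) false
      let p := pvRunScan t
      (acc.1 + (if p.1 then 1 else 0), acc.2 + (if p.2 then 1 else 0)))
    (0, 0)

-- ===== PRECONDITION & SPEC =====
def Spec_count_letter_occurrences (s : String) (out : Int × Int) : Prop := out = count_letter_occurrences_alt s
instance (s : String) (out : Int × Int) : Decidable (Spec_count_letter_occurrences s out) := by unfold Spec_count_letter_occurrences; infer_instance

-- ===== CLAIM (what is proved, stated in full; the proofs are below) =====
def Claim_equal_count_letter_occurrences : Prop := ∀ (s : String), Dom_count_letter_occurrences s → Spec_count_letter_occurrences s (count_letter_occurrences s)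

-- ===== LEMMAS AND PROOFS =====

theorem pv_dict_eq_counter (l : List Char) :
    l.foldl (fun (d : PySem.Dict Char Int) letter =>
        if d.contains letter then d.insert letter (d.getD letter 0 + 1)
        else d.insert letter 1) PySem.Dict.empty
      = PySem.Dict.counter l := by
  rw [← PySem.Dict.foldl_insert_getD_add_one_eq_counter]
  congr 1
  funext d x
  by_cases h : d.contains x = true
  · simp [h]
  · simp only [Bool.not_eq_true] at h
    simp [h, PySem.Dict.getD_of_not_contains d 0 h]

theorem pv_mem_counter_values (l : List Char) (n : Nat) :
    ((n : Int) ∈ (PySem.Dict.counter l).values) ↔ ∃ c ∈ l, l.count c = n := by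
  simp only [PySem.Dict.values, PySem.Dict.items_counter, List.map_map, List.mem_map,
    Function.comp]
  constructor
  · rintro ⟨c, hc, hv⟩
    exact ⟨c, (PySem.Set.mem_ofList l c).mp hc, by exact_mod_cast hv⟩
  · rintro ⟨c, hc, hv⟩
    exact ⟨c, (PySem.Set.mem_ofList l c).mpr hc, by exact_mod_cast hv⟩

-- in a sorted list whose elements are all ≥ c, dropping the leading run of c's drops ALL c's
theorem pv_not_mem_dropWhile (c : Char) (l : List Char) (hp : l.Pairwise (· ≤ ·))
    (hge : ∀ x ∈ l, c ≤ x) : c ∉ l.dropWhile (fun x => x == c) := by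
  induction l with
  | nil => simp
  | cons x xs ih =>
    by_cases hx : (x == c) = true
    · rw [List.dropWhile_cons, if_pos hx]
      exact ih hp.of_cons (fun y hy => hge y (List.mem_cons_of_mem _ hy))
    · rw [List.dropWhile_cons, if_neg hx]
      intro hmem
      rcases List.mem_cons.mp hmem with h | h
      · exact hx (by simp [h])
      · have h1 : x ≤ c := (List.pairwise_cons.mp hp).1 c h
        have h2 : c ≤ x := hge x (List.mem_cons_self ..)
        exact hx (by simp [le_antisymm h1 h2])

-- the run-length scan of a sorted list sees a run of length 2 (resp. 3) iff some
-- character occurs exactly 2 (resp. 3) times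
theorem pv_runScan_spec (t : List Char) (h : t.Pairwise (· ≤ ·)) :
    ((pvRunScan t).1 = true ↔ ∃ c ∈ t, t.count c = 2) ∧
    ((pvRunScan t).2 = true ↔ ∃ c ∈ t, t.count c = 3) := by
  induction t using pvRunScan.induct with
  | case1 => simp [pvRunScan]
  | case2 c rest k ih =>
    -- names for the pieces
    set tw := rest.takeWhile (fun x => x == c) with htw
    set dw := rest.dropWhile (fun x => x == c) with hdw
    have hsplit : tw ++ dw = rest := List.takeWhile_append_dropWhile
    have hdrop : rest.drop tw.length = dw := by
      conv_lhs => rw [← hsplit]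
      exact List.drop_left
    have hge : ∀ x ∈ rest, c ≤ x := (List.pairwise_cons.mp h).1
    have hrest : rest.Pairwise (· ≤ ·) := h.of_cons
    have hdwp : dw.Pairwise (· ≤ ·) := List.Pairwise.sublist (List.dropWhile_sublist _) hrest
    have hcnot : c ∉ dw := pv_not_mem_dropWhile c rest hrest hge
    have htwc : ∀ x ∈ tw, x = c := fun x hx => by
      have := List.mem_takeWhile_imp hx; simpa using this
    -- count of c in the whole list is the run length
    have hcount_c : (c :: rest).count c = tw.length + 1 := by
      rw [List.count_cons_self, ← hsplit, List.count_append]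
      have h1 : tw.count c = tw.length := List.count_eq_length.mpr
        (fun b hb => (htwc b hb).symm)
      have h2 : dw.count c = 0 := List.count_eq_zero.mpr hcnot
      omega
    -- counts of other characters are untouched by dropping the run
    have hcount_ne : ∀ d, d ≠ c → (c :: rest).count d = dw.count d := by
      intro d hd
      have h0 : (c :: rest).count d = rest.count d := by
        simp [Ne.symm hd]
      rw [h0, ← hsplit, List.count_append]
      have h1 : tw.count d = 0 := List.count_eq_zero.mpr
        (fun hmem => hd (htwc d hmem))
      omega
    have hmem_ne : ∀ d, d ≠ c → (d ∈ (c :: rest) ↔ d ∈ dw) := by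
      intro d hd
      rw [List.mem_cons, ← hsplit, List.mem_append]
      constructor
      · rintro (h | h | h)
        · exact absurd h hd
        · exact absurd (htwc d h) hd
        · exact h
      · exact fun h => Or.inr (Or.inr h)
    have hdwmem : ∀ d ∈ dw, d ∈ (c :: rest) := by
      intro d hd
      have : d ≠ c := fun he => hcnot (he ▸ hd)
      exact (hmem_ne d this).mpr hd
    -- the existence property decomposes run-by-run
    have hkey : ∀ n : Nat, ((∃ d ∈ (c :: rest), (c :: rest).count d = n) ↔
        (1 + tw.length = n ∨ ∃ d ∈ dw, dw.count d = n)) := by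
      intro n
      constructor
      · rintro ⟨d, hdmem, hdcount⟩
        by_cases hd : d = c
        · subst hd; left; omega
        · right
          exact ⟨d, (hmem_ne d hd).mp hdmem, by rw [← hcount_ne d hd]; exact hdcount⟩
      · rintro (hn | ⟨d, hdmem, hdcount⟩)
        · exact ⟨c, List.mem_cons_self .., by omega⟩
        · have hd : d ≠ c := fun he => hcnot (he ▸ hdmem)
          exact ⟨d, hdwmem d hdmem, by rw [hcount_ne d hd]; exact hdcount⟩
    have hk : k = tw.length := rfl
    rw [hk, hdrop] at ih
    obtain ⟨ih2, ih3⟩ := ih hdwp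
    rw [pvRunScan]
    simp only [← htw, hdrop]
    constructor
    · rw [hkey 2]
      simp only [Bool.or_eq_true, ih2, beq_iff_eq]
      exact or_comm
    · rw [hkey 3]
      simp only [Bool.or_eq_true, ih3, beq_iff_eq]
      exact or_comm

-- per-line agreement: A's dict test equals B's run-scan flag
theorem pv_line_step (line : List Char) (n : Nat) :
    (((n : Int)) ∈ (line.foldl (fun (d : PySem.Dict Char Int) letter =>
        if d.contains letter then d.insert letter (d.getD letter 0 + 1)
        else d.insert letter 1) PySem.Dict.empty).values) ↔
    (∃ c ∈ PySem.List.sorted line (fun x => x) false,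
        (PySem.List.sorted line (fun x => x) false).count c = n) := by
  rw [pv_dict_eq_counter, pv_mem_counter_values]
  have hperm := PySem.List.sorted_perm line (fun x => x) false
  constructor
  · rintro ⟨c, hc, hcount⟩
    exact ⟨c, hperm.mem_iff.mpr hc, by rw [hperm.count_eq]; exact hcount⟩
  · rintro ⟨c, hc, hcount⟩
    exact ⟨c, hperm.mem_iff.mp hc, by rw [← hperm.count_eq]; exact hcount⟩

-- ===== VERDICT (by name: the statement is the Claim_ definition above) =====
theorem count_letter_occurrences_spec : Claim_equal_count_letter_occurrences := by
  intro s _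
  unfold Spec_count_letter_occurrences count_letter_occurrences count_letter_occurrences_alt
  congr 1
  funext acc line
  have hpair : (PySem.List.sorted line (fun x => x) false).Pairwise (· ≤ ·) :=
    PySem.List.sorted_pairwise line (fun x => x)
  obtain ⟨h2, h3⟩ := pv_runScan_spec _ hpair
  have e2 := (pv_line_step line 2).trans h2.symm
  have e3 := (pv_line_step line 3).trans h3.symm
  norm_num at e2 e3
  simp only [Prod.mk.injEq]
  refine ⟨?_, ?_⟩
  · simp only [e2]
    split_ifs <;> omega
  · simp only [e3]
    split_ifs <;> omega
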